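-- pv_equiv track=rewrite | github.com/jbot-bit/canompx3 | research/comprehensive_deployed_lane_scan.py | _valid_session_features
-- ===== SOURCE A (Python) =====
-- def _valid_session_features(orb_session: str | None) -> set[str]:
--     """Return which session-level features are look-ahead-CLEAN for this ORB session.
--     Derived from SESSION_WINDOWS (asia 09:00-17:00, london 18:00-23:00, ny 23:00-02:00)
--     and ORB start times per pipeline.dst.SESSION_CATALOG.
--     """
--     # Rule: session_{x} is CLEAN iff ORB_start >= session_{x}_end (Brisbane).
--     # Approximate ORB start in Brisbane:
--     orb_start_brisbane = {
--         "CME_REOPEN": 8.0,        # ~08:00 Brisbane (varies with DST)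
--         "TOKYO_OPEN": 10.0,       # 10:00
--         "BRISBANE_0925": 9.42,    # 09:25
--         "BRISBANE_1025": 10.42,   # 10:25
--         "SINGAPORE_OPEN": 11.0,   # 11:00
--         "LONDON_METALS": 17.0,    # 17:00
--         "BRISBANE_1955": 19.92,   # 19:55
--         "EUROPE_FLOW": 18.0,      # 18:00
--         "US_DATA_830": 23.5,      # 23:30
--         "NYSE_OPEN": 24.5,        # 00:30 next day = 24.5
--         "US_DATA_1000": 25.0,     # 01:00 next day = 25.0
--         "COMEX_SETTLE": 28.5,     # 04:30 = 28.5
--         "CME_PRECLOSE": 30.0,     # 06:00 = 30.0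
--         "NYSE_CLOSE": 31.0,       # 07:00 = 31.0
--     }
--     session_ends_brisbane = {
--         "asia": 17.0,
--         "london": 23.0,
--         "ny": 26.0,  # 02:00 next day = 26.0
--     }
--     if orb_session is None or orb_session not in orb_start_brisbane:
--         return set()
--     orb_hr = orb_start_brisbane[orb_session]
--     valid = set()
--     for sess, end_hr in session_ends_brisbane.items():
--         if orb_hr >= end_hr:
--             valid.add(sess)
--     return valid
-- ===== SOURCE B (Python) =====
-- # Closed-form lookup table: for each ORB session the set of clean session
-- # features is precomputed once (asia iff start>=17, london iff >=23, ny iff >=26).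
-- _CLEAN_SESSIONS = {
--     "CME_REOPEN": frozenset(),
--     "TOKYO_OPEN": frozenset(),
--     "BRISBANE_0925": frozenset(),
--     "BRISBANE_1025": frozenset(),
--     "SINGAPORE_OPEN": frozenset(),
--     "LONDON_METALS": frozenset({"asia"}),
--     "BRISBANE_1955": frozenset({"asia"}),
--     "EUROPE_FLOW": frozenset({"asia"}),
--     "US_DATA_830": frozenset({"asia", "london"}),
--     "NYSE_OPEN": frozenset({"asia", "london"}),
--     "US_DATA_1000": frozenset({"asia", "london"}),
--     "COMEX_SETTLE": frozenset({"asia", "london", "ny"}),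
--     "CME_PRECLOSE": frozenset({"asia", "london", "ny"}),
--     "NYSE_CLOSE": frozenset({"asia", "london", "ny"}),
-- }
--
--
-- def _valid_session_features(orb_session: str | None) -> set[str]:
--     return set(_CLEAN_SESSIONS.get(orb_session, ()))
-- ===== Notes on version B (the rewrite author's own statement) =====
-- stated objective: simpler
-- what changed: Replaces the per-call threshold loop over session end hours with a single precomputed table mapping each ORB session name to its clean-session set, so the function is just a dict lookup with an empty-set default.
import Mathlib
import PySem

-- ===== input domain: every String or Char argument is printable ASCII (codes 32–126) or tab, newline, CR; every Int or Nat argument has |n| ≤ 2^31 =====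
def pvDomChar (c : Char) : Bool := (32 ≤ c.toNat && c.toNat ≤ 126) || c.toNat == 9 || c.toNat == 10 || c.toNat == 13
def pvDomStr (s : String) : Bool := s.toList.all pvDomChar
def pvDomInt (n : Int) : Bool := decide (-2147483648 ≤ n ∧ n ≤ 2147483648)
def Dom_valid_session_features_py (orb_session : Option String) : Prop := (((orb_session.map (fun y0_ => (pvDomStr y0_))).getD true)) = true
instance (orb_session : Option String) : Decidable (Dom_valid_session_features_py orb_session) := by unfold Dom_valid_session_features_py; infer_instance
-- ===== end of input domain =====

-- ===== PORT A =====
-- B replaces the threshold loop by a precomputed session -> clean-set table; objective: simpler.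
-- Hours are floats in Python with exact values at 1/100 resolution; both ports scale them by 100
-- to Int (9.42 -> 942 etc.), which is exact for every comparison the code makes.
def valid_session_features_py (orb_session : Option String) : List String :=
  let orb_start_brisbane : PySem.Dict String Int := PySem.Dict.ofList
    [("CME_REOPEN", 800), ("TOKYO_OPEN", 1000), ("BRISBANE_0925", 942),
     ("BRISBANE_1025", 1042), ("SINGAPORE_OPEN", 1100), ("LONDON_METALS", 1700),
     ("BRISBANE_1955", 1992), ("EUROPE_FLOW", 1800), ("US_DATA_830", 2350),
     ("NYSE_OPEN", 2450), ("US_DATA_1000", 2500), ("COMEX_SETTLE", 2850),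
     ("CME_PRECLOSE", 3000), ("NYSE_CLOSE", 3100)]
  let session_ends_brisbane : PySem.Dict String Int := PySem.Dict.ofList
    [("asia", 1700), ("london", 2300), ("ny", 2600)]
  match orb_session with
  | none => []
  | some s =>
    match orb_start_brisbane.get? s with
    | none => []
    | some orb_hr =>
      session_ends_brisbane.items.foldl
        (fun valid p => if orb_hr ≥ p.2 then PySem.Set.add valid p.1 else valid)
        (PySem.Set.ofList [])

-- ===== PORT B =====
def cleanSessionsTable : PySem.Dict String (List String) := PySem.Dict.ofList
  [("CME_REOPEN", []), ("TOKYO_OPEN", []), ("BRISBANE_0925", []),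
   ("BRISBANE_1025", []), ("SINGAPORE_OPEN", []),
   ("LONDON_METALS", ["asia"]), ("BRISBANE_1955", ["asia"]), ("EUROPE_FLOW", ["asia"]),
   ("US_DATA_830", ["asia", "london"]), ("NYSE_OPEN", ["asia", "london"]),
   ("US_DATA_1000", ["asia", "london"]),
   ("COMEX_SETTLE", ["asia", "london", "ny"]), ("CME_PRECLOSE", ["asia", "london", "ny"]),
   ("NYSE_CLOSE", ["asia", "london", "ny"])]

def valid_session_features_py_alt (orb_session : Option String) : List String :=
  match orb_session with
  | none => []
  | some s => cleanSessionsTable.getD s []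

-- ===== PRECONDITION & SPEC =====
def Spec_valid_session_features_py (orb_session : Option String) (out : List String) : Prop := out = valid_session_features_py_alt orb_session
instance (orb_session : Option String) (out : List String) : Decidable (Spec_valid_session_features_py orb_session out) := by unfold Spec_valid_session_features_py; infer_instance

-- ===== CLAIM (what is proved, stated in full; the proofs are below) =====
def Claim_equal_valid_session_features_py : Prop := ∀ (orb_session : Option String), Dom_valid_session_features_py orb_session → Spec_valid_session_features_py orb_session (valid_session_features_py orb_session)

-- ===== LEMMAS AND PROOFS =====

-- ===== VERDICT (by name: the statement is the Claim_ definition above) =====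
theorem valid_session_features_py_spec : Claim_equal_valid_session_features_py := by
  intro orb_session _
  unfold Spec_valid_session_features_py
  match orb_session with
  | none => rfl
  | some s =>
    by_cases h1 : s = "CME_REOPEN"; · subst h1; decide
    by_cases h2 : s = "TOKYO_OPEN"; · subst h2; decide
    by_cases h3 : s = "BRISBANE_0925"; · subst h3; decide
    by_cases h4 : s = "BRISBANE_1025"; · subst h4; decide
    by_cases h5 : s = "SINGAPORE_OPEN"; · subst h5; decide
    by_cases h6 : s = "LONDON_METALS"; · subst h6; decide
    by_cases h7 : s = "BRISBANE_1955"; · subst h7; decide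
    by_cases h8 : s = "EUROPE_FLOW"; · subst h8; decide
    by_cases h9 : s = "US_DATA_830"; · subst h9; decide
    by_cases h10 : s = "NYSE_OPEN"; · subst h10; decide
    by_cases h11 : s = "US_DATA_1000"; · subst h11; decide
    by_cases h12 : s = "COMEX_SETTLE"; · subst h12; decide
    by_cases h13 : s = "CME_PRECLOSE"; · subst h13; decide
    by_cases h14 : s = "NYSE_CLOSE"; · subst h14; decide
    simp [valid_session_features_py, valid_session_features_py_alt, cleanSessionsTable,
      PySem.Dict.ofList, PySem.Dict.update, PySem.Dict.getD_eq_get?_getD,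
      PySem.Dict.get?_insert, PySem.Dict.get?_empty, List.foldl,
      h1, h2, h3, h4, h5, h6, h7, h8, h9, h10, h11, h12, h13, h14]
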